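-- pv_equiv track=rewrite | github.com/sintaayurismawati/Data_Sinta-Ayu-Rismawati | 7_Data Structure/Praktikum/Prioritas_2.py | prime_rectangle
-- ===== SOURCE A (Python) =====
-- def is_prime(num):
--     if num <= 1:
--         return False
--     if num <= 3:
--         return True
--     if num % 2 == 0 or num % 3 == 0:
--         return False
--     i = 5
--     while i * i <= num:
--         if num % i == 0 or num % (i + 2) == 0:
--             return False
--         i += 6
--     return True
--
-- def prime_rectangle(height, width, start):
--     primes = []
--     total = 0
--     num = start + 1
--     for i in range(height):
--         row = []
--         for j in range(width):
--             while not is_prime(num):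
--                 num += 1
--             row.append(num)
--             total += num
--             num += 1
--         primes.append(row)
--     return primes, total
-- ===== SOURCE B (Python) =====
-- def _is_prime(n):
--     if n < 2:
--         return False
--     d = 2
--     while d * d <= n:
--         if n % d == 0:
--             return False
--         d += 1
--     return True
--
-- def _next_prime(n):
--     m = n + 1
--     while not _is_prime(m):
--         m += 1
--     return m
--
-- def prime_rectangle(height, width, start):
--     count = max(0, height) * max(0, width)
--     flat = []
--     num = start
--     for _ in range(count):
--         num = _next_prime(num)
--         flat.append(num)
--     rows = [flat[i * width:(i + 1) * width] for i in range(height)]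
--     return rows, sum(flat)
-- ===== Notes on version B (the rewrite author's own statement) =====
-- stated objective: alternative
-- what changed: A fills the grid with two nested loops, a wheel-6 trial-division primality test and a running total; B generates one flat stream of the first height*width primes above start with a plain sqrt trial-division test, then slices the stream into rows and sums it at the end.
import Mathlib
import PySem

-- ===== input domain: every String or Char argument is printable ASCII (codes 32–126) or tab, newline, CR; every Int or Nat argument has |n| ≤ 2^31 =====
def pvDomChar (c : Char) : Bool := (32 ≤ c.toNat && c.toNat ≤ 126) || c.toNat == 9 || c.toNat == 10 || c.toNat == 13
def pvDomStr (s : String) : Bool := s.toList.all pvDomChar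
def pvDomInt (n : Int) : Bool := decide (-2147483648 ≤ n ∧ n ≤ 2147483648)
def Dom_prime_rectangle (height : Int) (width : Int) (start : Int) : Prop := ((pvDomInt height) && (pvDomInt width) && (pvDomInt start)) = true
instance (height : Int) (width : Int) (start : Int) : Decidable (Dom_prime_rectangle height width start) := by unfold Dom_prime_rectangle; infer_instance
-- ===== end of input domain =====

-- B replaces A's nested fill-the-grid loops by one flat stream of primes that is
-- sliced into rows and summed at the end (objective: alternative; same asymptotic cost).
--
-- The Python while-loops are ported as structural recursions on an explicit fuel that
-- is large enough never to run out (the trial-division loops stop once d*d > n, and by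
-- Bertrand's postulate the interval [num, 2*max(num,2)] always contains a prime), so
-- each port computes exactly what its Python computes.

-- ===== PORT A =====
def isPrimeLoopA (fuel : Nat) (num i : Int) : Bool :=
  match fuel with
  | 0 => true
  | f + 1 =>
    if i * i ≤ num then
      if PySem.Int.mod num i == 0 || PySem.Int.mod num (i + 2) == 0 then false
      else isPrimeLoopA f num (i + 6)
    else true

def is_prime (num : Int) : Bool :=
  if num ≤ 1 then false
  else if num ≤ 3 then true
  else if PySem.Int.mod num 2 == 0 || PySem.Int.mod num 3 == 0 then false
  else isPrimeLoopA num.toNat num 5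

-- A's inner 'while not is_prime(num): num += 1'
def searchPrimeA (fuel : Nat) (num : Int) : Int :=
  match fuel with
  | 0 => num
  | f + 1 => if is_prime num then num else searchPrimeA f (num + 1)

def nextPrimeA (num : Int) : Int := searchPrimeA ((2 * max num 2 - num).toNat + 1) num

def rowLoop (w : Nat) (num total : Int) (row : List Int) : Int × Int × List Int :=
  match w with
  | 0 => (num, total, row)
  | Nat.succ w' =>
    let p := nextPrimeA num
    rowLoop w' (p + 1) (total + p) (row ++ [p])

def gridLoop (h w : Nat) (num total : Int) (primes : List (List Int)) : List (List Int) × Int :=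
  match h with
  | 0 => (primes, total)
  | Nat.succ h' =>
    let r := rowLoop w num total []
    gridLoop h' w r.1 r.2.1 (primes ++ [r.2.2])

def prime_rectangle (height width start : Int) : List (List Int) × Int :=
  gridLoop height.toNat width.toNat (start + 1) 0 []

-- ===== PORT B =====
def isPrimeLoopB (fuel : Nat) (n d : Int) : Bool :=
  match fuel with
  | 0 => true
  | f + 1 =>
    if d * d ≤ n then
      if PySem.Int.mod n d == 0 then false
      else isPrimeLoopB f n (d + 1)
    else true

def is_prime_alt (n : Int) : Bool :=
  if n < 2 then false else isPrimeLoopB n.toNat n 2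

-- B's '_next_prime': m = n + 1; while not _is_prime(m): m += 1
def searchPrimeB (fuel : Nat) (m : Int) : Int :=
  match fuel with
  | 0 => m
  | f + 1 => if is_prime_alt m then m else searchPrimeB f (m + 1)

def nextPrimeB (n : Int) : Int :=
  searchPrimeB ((2 * max (n + 1) 2 - (n + 1)).toNat + 1) (n + 1)

def buildFlat : Nat → Int → List Int
  | 0, _ => []
  | r + 1, num =>
    let p := nextPrimeB num
    p :: buildFlat r p

def prime_rectangle_alt (height width start : Int) : List (List Int) × Int :=
  let count : Int := max 0 height * max 0 width
  let flat := buildFlat count.toNat start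
  let rows := (List.range height.toNat).map
    (fun (i : Nat) => PySem.List.slice flat (some ((i : Int) * width)) (some (((i : Int) + 1) * width)))
  (rows, flat.foldl (· + ·) 0)

-- ===== PRECONDITION & SPEC =====
def Spec_prime_rectangle (height : Int) (width : Int) (start : Int) (out : List (List Int) × Int) : Prop := out = prime_rectangle_alt height width start
instance (height : Int) (width : Int) (start : Int) (out : List (List Int) × Int) : Decidable (Spec_prime_rectangle height width start out) := by unfold Spec_prime_rectangle; infer_instance

-- ===== CLAIM (what is proved, stated in full; the proofs are below) =====
def Claim_equal_prime_rectangle : Prop := ∀ (height : Int) (width : Int) (start : Int), Dom_prime_rectangle height width start → Spec_prime_rectangle height width start (prime_rectangle height width start)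

-- ===== LEMMAS AND PROOFS =====

-- characterization of the two trial-division loops
theorem loopB_iff : ∀ (fuel : Nat) (n d : Int), 2 ≤ d → (n + 1 - d).toNat ≤ fuel →
    (∀ e : Int, 2 ≤ e → e < d → ¬ e ∣ n) →
    (isPrimeLoopB fuel n d = true ↔ ∀ e : Int, 2 ≤ e → e * e ≤ n → ¬ e ∣ n) := by
  intro fuel
  induction fuel with
  | zero =>
    intro n d h2 hf hinv
    refine iff_of_true rfl ?_
    intro e he hee
    have h1 : 1 * e ≤ e * e := by apply mul_le_mul_of_nonneg_right <;> omega
    exact hinv e he (by omega)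
  | succ fuel ih =>
    intro n d h2 hf hinv
    simp only [isPrimeLoopB]
    by_cases hdd : d * d ≤ n
    · rw [if_pos hdd]
      by_cases hmod : PySem.Int.mod n d = 0
      · rw [if_pos (by simpa using hmod)]
        refine iff_of_false (by simp) ?_
        push_neg
        exact ⟨d, h2, hdd, (PySem.Int.mod_eq_zero_iff_dvd n d).mp hmod⟩
      · rw [if_neg (by simpa using hmod)]
        have hdn : 1 * d ≤ d * d := by apply mul_le_mul_of_nonneg_right <;> omega
        apply ih n (d + 1) (by omega) (by omega)
        intro e he hlt
        rcases (by omega : e < d ∨ e = d) with h | rfl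
        · exact hinv e he h
        · intro hdvd
          exact hmod ((PySem.Int.mod_eq_zero_iff_dvd n e).mpr hdvd)
    · rw [if_neg hdd]
      refine iff_of_true rfl ?_
      intro e he hee hdvd
      have hlt : e < d := by
        by_contra hge
        have : d * d ≤ e * e := by
          apply mul_le_mul (by omega) (by omega) (by omega) (by omega)
        omega
      exact hinv e he hlt hdvd

theorem is_prime_alt_iff (n : Int) :
    is_prime_alt n = true ↔ (2 ≤ n ∧ ∀ e : Int, 2 ≤ e → e * e ≤ n → ¬ e ∣ n) := by
  unfold is_prime_alt
  by_cases h : n < 2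
  · simp only [if_pos h]
    constructor
    · intro hc; cases hc
    · intro hc; omega
  · rw [if_neg h]
    rw [loopB_iff n.toNat n 2 (by omega) (by omega) (by intro e he hlt; omega)]
    constructor
    · intro hq; exact ⟨by omega, hq⟩
    · intro hq; exact hq.2

theorem loopA_iff : ∀ (fuel : Nat) (n i : Int), 5 ≤ i → (n + 1 - i).toNat ≤ fuel →
    i % 6 = 5 → ¬ (2 : Int) ∣ n → ¬ (3 : Int) ∣ n → 2 ≤ n →
    (∀ e : Int, 2 ≤ e → e < i → ¬ e ∣ n) →
    (isPrimeLoopA fuel n i = true ↔ ∀ e : Int, 2 ≤ e → e * e ≤ n → ¬ e ∣ n) := by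
  intro fuel
  induction fuel with
  | zero =>
    intro n i h5 hf h6 h2 h3 hn hinv
    refine iff_of_true rfl ?_
    intro e he hee
    have h1 : 1 * e ≤ e * e := by apply mul_le_mul_of_nonneg_right <;> omega
    exact hinv e he (by omega)
  | succ fuel ih =>
    intro n i h5 hf h6 h2 h3 hn hinv
    have h5i : 5 * i ≤ i * i := by apply mul_le_mul_of_nonneg_right <;> omega
    simp only [isPrimeLoopA]
    by_cases hii : i * i ≤ n
    · rw [if_pos hii]
      by_cases hmi : PySem.Int.mod n i = 0
      · rw [if_pos (by simp [hmi])]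
        refine iff_of_false (by simp) ?_
        push_neg
        exact ⟨i, by omega, hii, (PySem.Int.mod_eq_zero_iff_dvd n i).mp hmi⟩
      · by_cases hmi2 : PySem.Int.mod n (i + 2) = 0
        · rw [if_pos (by simp [hmi2])]
          refine iff_of_false (by simp) ?_
          push_neg
          have hdvd : (i + 2) ∣ n := (PySem.Int.mod_eq_zero_iff_dvd n (i + 2)).mp hmi2
          by_cases hbig : (i + 2) * (i + 2) ≤ n
          · exact ⟨i + 2, by omega, hbig, hdvd⟩
          · -- the cofactor c = n / (i+2) is then a small divisor
            set c := n / (i + 2) with hc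
            have hmul : (i + 2) * c = n := Int.mul_ediv_cancel' hdvd
            have hcpos : 0 < c := by
              by_cases h : 0 < c
              · exact h
              · exfalso
                have : (i + 2) * c ≤ 0 := mul_nonpos_of_nonneg_of_nonpos (by omega) (by omega)
                omega
            have hc1 : c ≠ 1 := by
              intro h1
              rw [h1, mul_one] at hmul
              omega
            have hclt : c < i + 2 := by
              by_contra hge
              have : (i + 2) * (i + 2) ≤ (i + 2) * c :=
                mul_le_mul_of_nonneg_left (by omega) (by omega)
              omega
            have hcc : c * c ≤ n := by
              calc c * c ≤ (i + 2) * c := mul_le_mul_of_nonneg_right (by omega) (by omega)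
                _ = n := hmul
            exact ⟨c, by omega, hcc, ⟨i + 2, by rw [← hmul]; ring⟩⟩
        · rw [if_neg (by simp [hmi, hmi2])]
          apply ih n (i + 6) (by omega) (by omega) (by omega) h2 h3 hn
          intro e he hlt hdvd
          rcases (by omega : e < i ∨ e = i ∨ e = i + 1 ∨ e = i + 2 ∨ e = i + 3 ∨ e = i + 4 ∨ e = i + 5) with h | rfl | rfl | rfl | rfl | rfl | rfl
          · exact hinv e he h hdvd
          · exact hmi ((PySem.Int.mod_eq_zero_iff_dvd n e).mpr hdvd)
          · exact h2 (dvd_trans (by omega : (2 : Int) ∣ i + 1) hdvd)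
          · exact hmi2 ((PySem.Int.mod_eq_zero_iff_dvd n (i + 2)).mpr hdvd)
          · exact h2 (dvd_trans (by omega : (2 : Int) ∣ i + 3) hdvd)
          · exact h3 (dvd_trans (by omega : (3 : Int) ∣ i + 4) hdvd)
          · exact h2 (dvd_trans (by omega : (2 : Int) ∣ i + 5) hdvd)
    · rw [if_neg hii]
      refine iff_of_true rfl ?_
      intro e he hee hdvd
      have hlt : e < i := by
        by_contra hge
        have : i * i ≤ e * e := by
          apply mul_le_mul (by omega) (by omega) (by omega) (by omega)
        omega
      exact hinv e he hlt hdvd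

theorem is_prime_iff (n : Int) :
    is_prime n = true ↔ (2 ≤ n ∧ ∀ e : Int, 2 ≤ e → e * e ≤ n → ¬ e ∣ n) := by
  unfold is_prime
  by_cases h1 : n ≤ 1
  · simp only [if_pos h1]
    exact iff_of_false (by simp) (by intro hc; omega)
  · rw [if_neg h1]
    by_cases h3 : n ≤ 3
    · rw [if_pos h3]
      refine iff_of_true rfl ⟨by omega, ?_⟩
      intro e he hee
      have : 2 * 2 ≤ e * e := by apply mul_le_mul (by omega) (by omega) (by omega) (by omega)
      omega
    · rw [if_neg h3]
      by_cases hm2 : PySem.Int.mod n 2 = 0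
      · rw [if_pos (by simp only [Bool.or_eq_true, beq_iff_eq]; exact Or.inl hm2)]
        refine iff_of_false (by simp) ?_
        push_neg
        intro _
        exact ⟨2, by omega, by omega, (PySem.Int.mod_eq_zero_iff_dvd n 2).mp hm2⟩
      · by_cases hm3 : PySem.Int.mod n 3 = 0
        · rw [if_pos (by simp only [Bool.or_eq_true, beq_iff_eq]; exact Or.inr hm3)]
          refine iff_of_false (by simp) ?_
          push_neg
          have hd3 : (3 : Int) ∣ n := (PySem.Int.mod_eq_zero_iff_dvd n 3).mp hm3
          have hd2 : ¬ (2 : Int) ∣ n := fun h => hm2 ((PySem.Int.mod_eq_zero_iff_dvd n 2).mpr h)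
          have h9 : 9 ≤ n := by omega
          intro _
          exact ⟨3, by omega, by omega, hd3⟩
        · rw [if_neg (by simp only [Bool.or_eq_true, beq_iff_eq]; rw [not_or]; exact ⟨hm2, hm3⟩)]
          have hd2 : ¬ (2 : Int) ∣ n := fun h => hm2 ((PySem.Int.mod_eq_zero_iff_dvd n 2).mpr h)
          have hd3 : ¬ (3 : Int) ∣ n := fun h => hm3 ((PySem.Int.mod_eq_zero_iff_dvd n 3).mpr h)
          rw [loopA_iff n.toNat n 5 (by omega) (by omega) (by decide) hd2 hd3 (by omega) ?hinv]
          case hinv =>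
            intro e he hlt hdvd
            rcases (by omega : e = 2 ∨ e = 3 ∨ e = 4) with rfl | rfl | rfl
            · exact hd2 hdvd
            · exact hd3 hdvd
            · exact hd2 (dvd_trans (by decide : (2 : Int) ∣ 4) hdvd)
          constructor
          · intro hq; exact ⟨by omega, hq⟩
          · intro hq; exact hq.2

theorem isp_eq (n : Int) : is_prime n = is_prime_alt n := by
  have h1 := is_prime_iff n
  have h2 := is_prime_alt_iff n
  by_cases hq : (2 ≤ n ∧ ∀ e : Int, 2 ≤ e → e * e ≤ n → ¬ e ∣ n)
  · rw [h1.mpr hq, h2.mpr hq]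
  · rw [Bool.eq_false_iff.mpr (fun ht => hq (h1.mp ht)),
        Bool.eq_false_iff.mpr (fun ht => hq (h2.mp ht))]

-- the two next-prime searches coincide
theorem searchB_eq_searchA : ∀ (fuel : Nat) (m : Int), searchPrimeB fuel m = searchPrimeA fuel m := by
  intro fuel
  induction fuel with
  | zero => intro m; rfl
  | succ f ih =>
    intro m
    show (if is_prime_alt m then m else searchPrimeB f (m + 1)) =
      (if is_prime m then m else searchPrimeA f (m + 1))
    rw [← isp_eq, ih]

def nxtP (num : Int) : Int := nextPrimeA (num + 1)

theorem nextPrimeB_eq (n : Int) : nextPrimeB n = nxtP n := by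
  unfold nextPrimeB nxtP nextPrimeA
  rw [searchB_eq_searchA]

theorem buildFlat_zero (num : Int) : buildFlat 0 num = [] := rfl

theorem buildFlat_cons (r : Nat) (num : Int) :
    buildFlat (r + 1) num = nxtP num :: buildFlat r (nxtP num) := by
  rw [show buildFlat (r + 1) num = nextPrimeB num :: buildFlat r (nextPrimeB num) from rfl,
    nextPrimeB_eq]

theorem length_buildFlat (r : Nat) : ∀ num : Int, (buildFlat r num).length = r := by
  induction r with
  | zero => intro num; rw [buildFlat_zero]; rfl
  | succ r ih => intro num; rw [buildFlat_cons, List.length_cons, ih]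

def consumeP : Nat → Int → Int
  | 0, n => n
  | k + 1, n => consumeP k (nxtP n)

theorem consumeP_add (a b : Nat) : ∀ num : Int,
    consumeP (a + b) num = consumeP b (consumeP a num) := by
  induction a with
  | zero => intro num; rw [Nat.zero_add]; rfl
  | succ a ih =>
    intro num
    rw [show a + 1 + b = (a + b) + 1 by omega]
    show consumeP (a + b) (nxtP num) = consumeP b (consumeP a (nxtP num))
    exact ih (nxtP num)

theorem buildFlat_add (a b : Nat) : ∀ num : Int,
    buildFlat (a + b) num = buildFlat a num ++ buildFlat b (consumeP a num) := by
  induction a with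
  | zero => intro num; rw [Nat.zero_add, buildFlat_zero]; simp [consumeP]
  | succ a ih =>
    intro num
    rw [show a + 1 + b = (a + b) + 1 by omega]
    rw [buildFlat_cons, buildFlat_cons, ih (nxtP num)]
    rfl

-- A-side loops expressed through the prime stream
theorem rowLoop_eq (w : Nat) : ∀ (num total : Int) (row : List Int),
    rowLoop w num total row =
      (consumeP w (num - 1) + 1, total + (buildFlat w (num - 1)).sum,
        row ++ buildFlat w (num - 1)) := by
  induction w with
  | zero =>
    intro num total row
    simp [rowLoop, consumeP, buildFlat_zero]
  | succ w ih =>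
    intro num total row
    have hp : nxtP (num - 1) = nextPrimeA num := by
      unfold nxtP; norm_num
    rw [show rowLoop (w + 1) num total row =
      rowLoop w (nextPrimeA num + 1) (total + nextPrimeA num) (row ++ [nextPrimeA num]) from rfl]
    rw [ih]
    rw [buildFlat_cons, show consumeP (w + 1) (num - 1) = consumeP w (nxtP (num - 1)) from rfl]
    rw [hp]
    simp only [add_sub_cancel_right, List.sum_cons, List.append_assoc, List.cons_append,
      List.nil_append]
    rw [add_assoc]

def chunksL : Nat → Nat → Int → List (List Int)
  | 0, _, _ => []
  | h + 1, w, m => buildFlat w m :: chunksL h w (consumeP w m)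

theorem gridLoop_eq (h : Nat) (w : Nat) : ∀ (num total : Int) (primes : List (List Int)),
    gridLoop h w num total primes =
      (primes ++ chunksL h w (num - 1), total + (buildFlat (h * w) (num - 1)).sum) := by
  induction h with
  | zero =>
    intro num total primes
    simp [gridLoop, chunksL, buildFlat_zero]
  | succ h ih =>
    intro num total primes
    rw [show gridLoop (h + 1) w num total primes =
      gridLoop h w (rowLoop w num total []).1 (rowLoop w num total []).2.1
        (primes ++ [(rowLoop w num total []).2.2]) from rfl]
    rw [rowLoop_eq]
    simp only [List.nil_append]
    rw [ih]
    simp only [add_sub_cancel_right]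
    rw [show (h + 1) * w = w + h * w by ring]
    rw [buildFlat_add w (h * w) (num - 1)]
    rw [List.sum_append]
    rw [show chunksL (h + 1) w (num - 1) =
      buildFlat w (num - 1) :: chunksL h w (consumeP w (num - 1)) from rfl]
    simp [add_assoc]

theorem prime_rectangle_closed (h w s : Int) :
    prime_rectangle h w s =
      (chunksL h.toNat w.toNat s, (buildFlat (h.toNat * w.toNat) s).sum) := by
  unfold prime_rectangle
  rw [gridLoop_eq]
  simp

theorem chunksL_eq_map (h w : Nat) : ∀ num : Int,
    chunksL h w num = (List.range h).map (fun i => buildFlat w (consumeP (i * w) num)) := by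
  induction h with
  | zero => intro num; rfl
  | succ h ih =>
    intro num
    rw [show chunksL (h + 1) w num =
      buildFlat w num :: chunksL h w (consumeP w num) from rfl, ih]
    rw [List.range_succ_eq_map, List.map_cons, List.map_map]
    congr 1
    · rw [Nat.zero_mul]
      rfl
    · apply List.map_congr_left
      intro i _
      show buildFlat w (consumeP (i * w) (consumeP w num)) = buildFlat w (consumeP (Nat.succ i * w) num)
      rw [show Nat.succ i * w = w + i * w by rw [Nat.succ_mul]; omega]
      rw [consumeP_add]

theorem chunksL_zero_w (h : Nat) : ∀ num : Int, chunksL h 0 num = List.replicate h [] := by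
  induction h with
  | zero => intro num; rfl
  | succ h ih =>
    intro num
    rw [show chunksL (h + 1) 0 num =
      buildFlat 0 num :: chunksL h 0 (consumeP 0 num) from rfl]
    rw [buildFlat_zero, ih, List.replicate_succ]

theorem slice_nil (a b : Int) :
    PySem.List.slice ([] : List Int) (some a) (some b) = [] := by
  simp [PySem.List.slice]

theorem foldl_add_eq_sum : ∀ (l : List Int) (c : Int), l.foldl (· + ·) c = c + l.sum := by
  intro l
  induction l with
  | nil => intro c; simp
  | cons x l ih =>
    intro c
    rw [List.foldl_cons, ih, List.sum_cons]
    ring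

theorem count_toNat (h w : Int) : (max 0 h * max 0 w).toNat = h.toNat * w.toNat := by
  have h1 : max 0 h = (h.toNat : Int) := by omega
  have h2 : max 0 w = (w.toNat : Int) := by omega
  rw [h1, h2, ← Nat.cast_mul, Int.toNat_natCast]

theorem slice_chunk (hN wN i : Nat) (s : Int) (hi : i < hN) :
    PySem.List.slice (buildFlat (hN * wN) s)
      (some ((i * wN : Nat) : Int)) (some (((i + 1) * wN : Nat) : Int)) =
      buildFlat wN (consumeP (i * wN) s) := by
  obtain ⟨k, rfl⟩ : ∃ k, hN = i + 1 + k := ⟨hN - i - 1, by omega⟩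
  rw [PySem.List.slice_natCast]
  rw [show (i + 1 + k) * wN = i * wN + (wN + k * wN) by ring]
  rw [buildFlat_add]
  rw [List.drop_left' (length_buildFlat (i * wN) s)]
  rw [show (i + 1) * wN - i * wN = wN by rw [Nat.succ_mul]; omega]
  rw [buildFlat_add]
  rw [List.take_left' (length_buildFlat wN (consumeP (i * wN) s))]

theorem prime_rectangle_alt_def (h w s : Int) : prime_rectangle_alt h w s =
    ((List.range h.toNat).map
      (fun (i : Nat) => PySem.List.slice (buildFlat (max 0 h * max 0 w).toNat s)
        (some ((i : Int) * w)) (some (((i : Int) + 1) * w))),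
     (buildFlat (max 0 h * max 0 w).toNat s).foldl (· + ·) 0) := rfl

theorem main_eq (h w s : Int) : prime_rectangle h w s = prime_rectangle_alt h w s := by
  rw [prime_rectangle_alt_def, prime_rectangle_closed, count_toNat]
  refine Prod.ext ?_ ?_
  · show chunksL h.toNat w.toNat s = _
    by_cases hw : w ≤ 0
    · have hw0 : w.toNat = 0 := by omega
      rw [hw0, chunksL_zero_w, Nat.mul_zero, buildFlat_zero]
      have hmap : ∀ i ∈ List.range h.toNat,
          PySem.List.slice ([] : List Int) (some ((i : Int) * w)) (some (((i : Int) + 1) * w)) =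
            ([] : List Int) := fun i _ => slice_nil _ _
      show List.replicate h.toNat ([] : List Int) = _
      rw [List.map_congr_left hmap, List.map_const', List.length_range]
    · have hwc : w = (w.toNat : Int) := by omega
      rw [chunksL_eq_map]
      apply (List.map_congr_left ?_).symm
      intro i hi
      rw [List.mem_range] at hi
      have e1 : (i : Int) * w = ((i * w.toNat : Nat) : Int) := by
        push_cast
        rw [← hwc]
      have e2 : ((i : Int) + 1) * w = (((i + 1) * w.toNat : Nat) : Int) := by
        push_cast
        rw [← hwc]
      rw [e1, e2]
      exact slice_chunk h.toNat w.toNat i s hi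
  · show (buildFlat (h.toNat * w.toNat) s).sum = _
    rw [foldl_add_eq_sum, zero_add]

-- ===== VERDICT (by name: the statement is the Claim_ definition above) =====
theorem prime_rectangle_spec : Claim_equal_prime_rectangle := by
  intro height width start _
  unfold Spec_prime_rectangle
  exact main_eq height width start
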